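-- pv_equiv track=rewrite | github.com/SeifeldinZook/MITx-6.00.1x | Midterm.py | satisfiesF
-- ===== SOURCE A (Python) =====
-- def satisfiesF(L):
--     rec_list = []
--
--     for i in range( 0, len( L ) ):
--         if (f( L[i] ) == False):
--             rec_list.append(L[i])
--
--     for j in rec_list:
--         L.remove(j)
--
--     return len( L )
--
-- def f(s):
--     return 'a' in s
-- ===== SOURCE B (Python) =====
-- def satisfiesF(L):
--     # Single in-place compaction pass with a write cursor (no second remove pass).
--     w = 0
--     for x in L:
--         if f(x):
--             L[w] = x
--             w += 1
--     del L[w:]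
--     return w
--
-- def f(s):
--     return 'a' in s
-- ===== Notes on version B (the rewrite author's own statement) =====
-- stated objective: faster
-- what changed: Replaces A's two-pass collect-then-remove-by-value (each remove rescans the list) with a single in-place two-pointer compaction maintaining a write cursor, returning the cursor.
import Mathlib
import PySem

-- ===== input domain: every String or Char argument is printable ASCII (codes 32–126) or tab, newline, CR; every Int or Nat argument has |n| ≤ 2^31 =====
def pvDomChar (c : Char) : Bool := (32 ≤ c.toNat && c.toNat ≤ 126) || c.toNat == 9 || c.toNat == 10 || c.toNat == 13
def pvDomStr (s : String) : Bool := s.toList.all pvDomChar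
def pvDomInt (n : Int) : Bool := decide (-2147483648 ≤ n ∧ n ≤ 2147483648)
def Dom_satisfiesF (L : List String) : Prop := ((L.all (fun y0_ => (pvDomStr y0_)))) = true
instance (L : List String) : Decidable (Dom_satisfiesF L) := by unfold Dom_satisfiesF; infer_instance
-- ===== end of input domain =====

-- B replaces A's collect-then-remove-by-value two-pass scheme with one in-place
-- two-pointer compaction pass (asymptotically faster); both mutate L the same way in
-- Python, and the theorems here are about the return value.

-- ===== PORT A =====
-- f(s) = 'a' in s
def pvF (s : String) : Bool := PySem.Str.isIn "a" s

-- literal port of A: first loop collects the elements with f == False into rec_list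
-- (L[i] is in range, so pyGetD with a dummy default is exact); second loop removes
-- each of them by value (remove always finds its value here, so getD is exact);
-- return the final length.
def satisfiesF (L : List String) : Int :=
  let recList := (PySem.List.pyRange 0 (L.length : Int) 1).foldl
    (fun acc i =>
      if pvF (PySem.List.pyGetD L i "") == false
      then acc ++ [PySem.List.pyGetD L i ""] else acc) []
  let L' := recList.foldl (fun acc j => (PySem.List.remove? acc j).getD acc) L
  (L'.length : Int)

-- ===== PORT B =====
-- port of B: one fold over L keeping (compacted prefix, write cursor w); return w.
def satisfiesF_alt (L : List String) : Int :=
  (L.foldl (fun (st : List String × Int) x =>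
      if pvF x then (st.1 ++ [x], st.2 + 1) else st) ([], 0)).2

-- ===== PRECONDITION & SPEC =====
def Spec_satisfiesF (L : List String) (out : Int) : Prop := out = satisfiesF_alt L
instance (L : List String) (out : Int) : Decidable (Spec_satisfiesF L out) := by unfold Spec_satisfiesF; infer_instance

-- ===== CLAIM (what is proved, stated in full; the proofs are below) =====
def Claim_equal_satisfiesF : Prop := ∀ (L : List String), Dom_satisfiesF L → Spec_satisfiesF L (satisfiesF L)

-- ===== LEMMAS AND PROOFS =====

-- removing a value with p = false from a list headed by a p = true element keeps the head
theorem pvFoldRem_cons (p : String → Bool) (js : List String)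
    (hjs : ∀ j ∈ js, p j = false) (x : String) (hx : p x = true) (acc : List String) :
    js.foldl (fun acc j => (PySem.List.remove? acc j).getD acc) (x :: acc)
      = x :: js.foldl (fun acc j => (PySem.List.remove? acc j).getD acc) acc := by
  induction js generalizing acc with
  | nil => rfl
  | cons j js ih =>
    have hxj : x ≠ j := by
      intro h; rw [h] at hx; rw [hjs j (by simp)] at hx; exact Bool.false_ne_true hx
    have h1 : (PySem.List.remove? (x :: acc) j).getD (x :: acc)
        = x :: (PySem.List.remove? acc j).getD acc := by
      rw [PySem.List.remove?_cons_of_ne acc hxj]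
      cases PySem.List.remove? acc j <;> rfl
    simp only [List.foldl_cons, h1]
    exact ih (fun j hj => hjs j (by simp [hj])) _

-- removing every ¬p-element of L from L leaves exactly the p-elements of L
theorem pvFoldRem_filter (p : String → Bool) (L : List String) :
    (L.filter (fun x => !p x)).foldl
        (fun acc j => (PySem.List.remove? acc j).getD acc) L
      = L.filter p := by
  induction L with
  | nil => rfl
  | cons x L ih =>
    by_cases hx : p x = true
    · have h1 : (x :: L).filter (fun x => !p x) = L.filter (fun x => !p x) := by
        simp [List.filter_cons, hx]
      rw [h1, pvFoldRem_cons p _ (fun j hj => by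
            have := List.of_mem_filter hj; simpa using this) x hx, ih]
      simp [List.filter_cons, hx]
    · have hx' : p x = false := by simpa using hx
      have h1 : (x :: L).filter (fun x => !p x) = x :: L.filter (fun x => !p x) := by
        simp [List.filter_cons, hx']
      rw [h1]
      simp only [List.foldl_cons, PySem.List.remove?_cons_self, Option.getD_some]
      rw [ih]
      simp [List.filter_cons, hx']

-- B's cursor counts the p-elements
theorem pvAlt_count (L : List String) (st : List String × Int) :
    (L.foldl (fun (st : List String × Int) x =>
        if pvF x then (st.1 ++ [x], st.2 + 1) else st) st).2
      = st.2 + (L.countP pvF : Int) := by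
  induction L generalizing st with
  | nil => simp
  | cons x L ih =>
    by_cases hx : pvF x = true <;>
      simp [List.foldl_cons, List.countP_cons, hx, ih] <;> ring

-- ===== VERDICT (by name: the statement is the Claim_ definition above) =====
theorem satisfiesF_spec : Claim_equal_satisfiesF := by
  intro L _
  unfold Spec_satisfiesF satisfiesF satisfiesF_alt
  rw [PySem.List.foldl_pyRange_zero_pyGetD' L ""
      (fun acc v => if pvF v == false then acc ++ [v] else acc) []]
  have h1 : L.foldl (fun acc v => if pvF v == false then acc ++ [v] else acc) []
      = L.filter (fun x => !pvF x) := by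
    rw [PySem.List.foldl_append_if_eq_filter]
    simp
  simp only [h1, pvFoldRem_filter pvF L, pvAlt_count L ([], 0)]
  simp [List.countP_eq_length_filter]
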